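-- pv_equiv track=rewrite | github.com/Velas-Commerce/lightning-pulse | services/graph_metrics.py | _median_node_degree
-- ===== SOURCE A (Python) =====
-- def _median_node_degree(edges: list[dict]) -> int:
--     degree: dict[str, int] = {}
--     for edge in edges:
--         for key in ("node1_pub", "node2_pub"):
--             pub = edge.get(key)
--             if pub:
--                 degree[pub] = degree.get(pub, 0) + 1
--     if not degree:
--         return 0
--     counts = sorted(degree.values())
--     return counts[len(counts) // 2]
-- ===== SOURCE B (Python) =====
-- def _median_node_degree(edges: list) -> int:
--     degree: dict = {}
--     for edge in edges:
--         for pub in (edge.get("node1_pub"), edge.get("node2_pub")):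
--             if pub:
--                 degree[pub] = degree.get(pub, 0) + 1
--     n = len(degree)
--     if n == 0:
--         return 0
--     # counting-selection: no full sort of the k degree values, only of the
--     # distinct values; walk them in increasing order until the median index
--     freq: dict = {}
--     for d in degree.values():
--         freq[d] = freq.get(d, 0) + 1
--     k = n // 2
--     for d in sorted(freq):
--         if k < freq[d]:
--             return d
--         k -= freq[d]
-- ===== Notes on version B (the rewrite author's own statement) =====
-- stated objective: alternative
-- what changed: B replaces sorting all k degree values and indexing the middle by a counting selection: it builds a degree-value frequency table and walks only the sorted distinct values, decrementing the median index until it falls inside a frequency block.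
import Mathlib
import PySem

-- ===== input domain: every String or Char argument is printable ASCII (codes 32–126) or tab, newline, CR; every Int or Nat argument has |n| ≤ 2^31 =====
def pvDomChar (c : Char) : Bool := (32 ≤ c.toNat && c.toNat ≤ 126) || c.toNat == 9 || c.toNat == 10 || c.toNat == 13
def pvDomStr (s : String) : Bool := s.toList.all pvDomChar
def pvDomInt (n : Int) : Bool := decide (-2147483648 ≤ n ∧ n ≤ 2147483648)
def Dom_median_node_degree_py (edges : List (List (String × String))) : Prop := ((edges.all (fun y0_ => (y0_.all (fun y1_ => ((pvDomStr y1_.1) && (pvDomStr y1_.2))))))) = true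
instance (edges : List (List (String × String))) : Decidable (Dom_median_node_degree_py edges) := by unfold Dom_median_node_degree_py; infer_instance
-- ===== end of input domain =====

-- B replaces the full sort of the k degree values by a counting selection over the
-- sorted distinct degree values (alternative algorithm; not claimed faster).

-- ===== PORT A =====
-- the degree-counting loop of A ('for key in (...): pub = edge.get(key); if pub: ...')
def pvDegreeA (edges : List (List (String × String))) : PySem.Dict String Int :=
  edges.foldl (fun degree edge =>
    (["node1_pub", "node2_pub"] : List String).foldl (fun degree key =>
      match (PySem.Dict.mk edge).get? key with
      | some pub => if pub == "" then degree else degree.insert pub (degree.getD pub 0 + 1)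
      | none => degree) degree) PySem.Dict.empty

-- counts = sorted(degree.values())
def pvCountsA (edges : List (List (String × String))) : List Int :=
  PySem.List.sorted (pvDegreeA edges).values (fun x => x) false

def median_node_degree_py (edges : List (List (String × String))) : Int :=
  if (pvDegreeA edges).size == 0 then 0
  else
    -- counts[len(counts)//2]: counts is nonempty on this branch, so the index is
    -- always in range and Python never raises; pyGetD is exact here
    PySem.List.pyGetD (pvCountsA edges) (PySem.Int.floordiv ((pvCountsA edges).length : Int) 2) 0

-- ===== PORT B =====
-- the degree-counting loop of B ('for pub in (edge.get(...), edge.get(...)): if pub: ...')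
def pvDegreeB (edges : List (List (String × String))) : PySem.Dict String Int :=
  edges.foldl (fun degree edge =>
    ([(PySem.Dict.mk edge).get? "node1_pub", (PySem.Dict.mk edge).get? "node2_pub"]).foldl
      (fun degree pub =>
        match pub with
        | some p => if p == "" then degree else degree.insert p (degree.getD p 0 + 1)
        | none => degree) degree) PySem.Dict.empty

-- the frequency table of the degree values ('freq[d] = freq.get(d, 0) + 1')
def pvFreqB (edges : List (List (String × String))) : PySem.Dict Int Int :=
  (pvDegreeB edges).values.foldl (fun d x => d.insert x (d.getD x 0 + 1)) PySem.Dict.empty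

-- walk the sorted distinct degree values; the [] case is unreachable (the median
-- index is always below the total frequency), mirroring Source B's always-returning loop
def pvPick (freq : PySem.Dict Int Int) (ks : List Int) (k : Int) : Int :=
  match ks with
  | [] => 0
  | d :: rest => if k < freq.getD d 0 then d else pvPick freq rest (k - freq.getD d 0)

def median_node_degree_py_alt (edges : List (List (String × String))) : Int :=
  if ((pvDegreeB edges).size : Int) == 0 then 0
  else
    pvPick (pvFreqB edges)
      (PySem.List.sorted (pvFreqB edges).keys (fun x => x) false)
      (PySem.Int.floordiv ((pvDegreeB edges).size : Int) 2)

-- ===== PRECONDITION & SPEC =====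
def Spec_median_node_degree_py (edges : List (List (String × String))) (out : Int) : Prop := out = median_node_degree_py_alt edges
instance (edges : List (List (String × String))) (out : Int) : Decidable (Spec_median_node_degree_py edges out) := by unfold Spec_median_node_degree_py; infer_instance

-- ===== CLAIM (what is proved, stated in full; the proofs are below) =====
def Claim_equal_median_node_degree_py : Prop := ∀ (edges : List (List (String × String))), Dom_median_node_degree_py edges → Spec_median_node_degree_py edges (median_node_degree_py edges)

-- ===== LEMMAS AND PROOFS =====

-- the two degree-building folds produce the same dict
lemma pv_degree_eq (edges : List (List (String × String))) :
    pvDegreeA edges = pvDegreeB edges := by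
  rfl

-- the hand-written frequency loop is Counter(degree.values())
lemma pv_freq_eq (edges : List (List (String × String))) :
    pvFreqB edges = PySem.Dict.counter (pvDegreeB edges).values :=
  PySem.Dict.foldl_insert_getD_add_one_eq_counter _

-- count of x in the flattened frequency blocks
lemma pv_count_flat (vs : List Int) (ks : List Int) (hnd : ks.Nodup) (x : Int) :
    (ks.flatMap (fun d => List.replicate (vs.count d) d)).count x
      = if x ∈ ks then vs.count x else 0 := by
  induction ks with
  | nil => simp
  | cons d rest ih =>
    simp only [List.flatMap_cons, List.count_append, List.nodup_cons] at *
    rw [ih hnd.2]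
    by_cases hxd : x = d
    · subst hxd
      simp [hnd.1]
    · simp [List.count_replicate, hxd]
      intro h; exact absurd h.symm hxd

lemma pv_mem_flat (vs : List Int) (ks : List Int) (x : Int)
    (hx : x ∈ ks.flatMap (fun d => List.replicate (vs.count d) d)) : x ∈ ks := by
  rcases List.mem_flatMap.mp hx with ⟨d, hd, hxd⟩
  rw [List.eq_of_mem_replicate hxd]; exact hd

lemma pv_pairwise_flat (vs : List Int) (ks : List Int) (hp : ks.Pairwise (· < ·)) :
    (ks.flatMap (fun d => List.replicate (vs.count d) d)).Pairwise (· ≤ ·) := by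
  induction ks with
  | nil => simp
  | cons d rest ih =>
    rw [List.pairwise_cons] at hp
    simp only [List.flatMap_cons]
    rw [List.pairwise_append]
    refine ⟨List.pairwise_replicate.mpr (Or.inr le_rfl), ih hp.2, ?_⟩
    intro a ha b hb
    rw [List.eq_of_mem_replicate ha]
    exact le_of_lt (hp.1 _ (pv_mem_flat vs rest b hb))

-- sorted(vs) is the concatenation of the frequency blocks over the sorted distinct values
lemma pv_sorted_flat (vs : List Int) :
    PySem.List.sorted vs (fun x => x) false
      = (PySem.List.sorted (PySem.Set.ofList vs) (fun x => x) false).flatMap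
          (fun d => List.replicate (vs.count d) d) := by
  have hnd : (PySem.List.sorted (PySem.Set.ofList vs) (fun x => x) false).Nodup :=
    (PySem.List.sorted_perm _ _ _).symm.nodup (PySem.Set.nodup_ofList vs)
  have hmem : ∀ x, x ∈ PySem.List.sorted (PySem.Set.ofList vs) (fun x => x) false ↔ x ∈ vs := by
    intro x
    exact ((PySem.List.sorted_perm _ _ _).mem_iff).trans (PySem.Set.mem_ofList vs x)
  refine PySem.List.sorted_id_eq_of_perm_of_pairwise _ _ ?_ ?_
  · rw [List.perm_iff_count]
    intro x
    rw [pv_count_flat vs _ hnd x]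
    by_cases hx : x ∈ PySem.List.sorted (PySem.Set.ofList vs) (fun x => x) false
    · simp [hx]
    · simp [hx, List.count_eq_zero.mpr (fun h => hx ((hmem x).mpr h))]
  · exact pv_pairwise_flat vs _ (PySem.List.sorted_ofList_pairwise_lt vs)

-- the counting selection indexes into the flattened blocks
lemma pv_pick_spec (vs : List Int) (ks : List Int) (k : Int) (h0 : 0 ≤ k)
    (hk : k.toNat < (ks.flatMap (fun d => List.replicate (vs.count d) d)).length) :
    pvPick (PySem.Dict.counter vs) ks k
      = (ks.flatMap (fun d => List.replicate (vs.count d) d))[k.toNat] := by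
  induction ks generalizing k with
  | nil => simp at hk
  | cons d rest ih =>
    rw [List.flatMap_cons, List.length_append, List.length_replicate] at hk
    simp only [List.flatMap_cons]
    have hcd : (PySem.Dict.counter vs).getD d 0 = (vs.count d : Int) :=
      PySem.Dict.getD_counter vs d
    rw [pvPick, hcd]
    by_cases hlt : k < (vs.count d : Int)
    · have hkn : k.toNat < vs.count d := by omega
      rw [if_pos hlt]
      rw [List.getElem_append_left (by simpa using hkn)]
      simp
    · rw [if_neg hlt]
      have h0' : 0 ≤ k - (vs.count d : Int) := by omega
      have hk' : (k - (vs.count d : Int)).toNat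
          < (rest.flatMap (fun d => List.replicate (vs.count d) d)).length := by omega
      rw [ih (k - (vs.count d : Int)) h0' hk']
      rw [List.getElem_append_right (by simp; omega)]
      congr 1
      simp

-- values/size bookkeeping
lemma pv_size_eq_len_values (d : PySem.Dict String Int) : d.size = d.values.length := by
  simp [PySem.Dict.size, PySem.Dict.values]

-- ===== VERDICT (by name: the statement is the Claim_ definition above) =====
theorem median_node_degree_py_spec : Claim_equal_median_node_degree_py := by
  intro edges _
  unfold Spec_median_node_degree_py median_node_degree_py median_node_degree_py_alt
  rw [← pv_degree_eq]
  by_cases hz : (pvDegreeA edges).size = 0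
  · simp [hz]
  · have hbA : ((pvDegreeA edges).size == 0) = false := by simpa using hz
    have hbB : (((pvDegreeA edges).size : Int) == 0) = false := by simp; omega
    rw [hbA, hbB, if_neg (by simp), if_neg (by simp)]
    have hvs := pv_size_eq_len_values (pvDegreeA edges)
    -- abbreviations
    have hfreq : pvFreqB edges = PySem.Dict.counter (pvDegreeA edges).values := by
      rw [pv_freq_eq, ← pv_degree_eq]
    have hkeys : (pvFreqB edges).keys = PySem.Set.ofList (pvDegreeA edges).values := by
      rw [hfreq, PySem.Dict.keys_counter]
    have hn : 0 < (pvDegreeA edges).values.length := by omega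
    -- the index
    have hfd : PySem.Int.floordiv (((pvDegreeA edges).size : Int)) 2
        = (((pvDegreeA edges).size / 2 : Nat) : Int) := PySem.Int.floordiv_natCast _ 2
    have hflat := pv_sorted_flat (pvDegreeA edges).values
    have hlenflat : ((PySem.List.sorted (PySem.Set.ofList (pvDegreeA edges).values) (fun x => x) false).flatMap
          (fun d => List.replicate ((pvDegreeA edges).values.count d) d)).length
        = (pvDegreeA edges).values.length := by
      rw [← hflat, PySem.List.length_sorted]
    have hidx : (pvDegreeA edges).size / 2 < (pvDegreeA edges).values.length := by
      have := Nat.div_lt_self hn (by norm_num : 1 < 2)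
      omega
    -- RHS: the counting selection
    rw [pv_freq_eq, ← pv_degree_eq, PySem.Dict.keys_counter]
    have hlenc : (pvCountsA edges).length = (pvDegreeA edges).values.length := by
      simp [pvCountsA, PySem.List.length_sorted]
    rw [hvs] at hfd hidx ⊢
    rw [hlenc, hfd]
    have hkb : ((((pvDegreeA edges).values.length / 2 : Nat) : Int)).toNat
        < ((PySem.List.sorted (PySem.Set.ofList (pvDegreeA edges).values) (fun x => x) false).flatMap
            (fun d => List.replicate ((pvDegreeA edges).values.count d) d)).length := by
      rw [hlenflat]; simpa using hidx
    rw [pv_pick_spec _ _ _ (Int.natCast_nonneg _) hkb]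
    have hc : pvCountsA edges
        = (PySem.List.sorted (PySem.Set.ofList (pvDegreeA edges).values) (fun x => x) false).flatMap
            (fun d => List.replicate ((pvDegreeA edges).values.count d) d) := hflat
    rw [hc, PySem.List.pyGetD_natCast]
    rw [List.getD_eq_getElem _ _ (by rw [hlenflat]; exact hidx)]
    simp only [Int.toNat_natCast]
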